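-- pv_equiv track=rewrite | github.com/RuskiDre1/PythonAlgorithms | HW6/hw6.py | largestProgram
-- ===== SOURCE A (Python) =====
-- from itertools import product
-- from itertools import product
--
-- def machine(data,code):
--     i = 0
--     value = 0
--     for instruction in code:
--             if i >= len(data): raise Exception("Ran out of numbers")
--             if instruction == "ADD":
--                     value += data[i]
--                     i += 1
--             elif instruction == "MUL":
--                     value += data[i] * data[i+1]
--                     i += 2
--             else: raise Exception("Illegal Instruction: "+instruction)
--
--     if i<len(data):
--             raise Exception("has leftover numbers")
--
--     return value
--
-- def largestProgram(data):
--     """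
--     >>> largestProgram([2,3,5])
--     ['ADD', 'MUL']
--     """
--
--     # Variables to store max value and code
--     max_val = float('-inf')
--     max_code = None
--
--     # Instructions and values
--     instrunctions = {'ADD':1, 'MUL':2}
--
--     # Loop over all combinations
--     for k in range(1,len(data)+1):
--             codes = list(product(instrunctions.keys(),repeat=k))
--
--             # For each code generated
--             for code in codes:
--
--                     # Find if valid code is produced
--                     sum_code = 0
--                     for instr in code:
--                             sum_code += instrunctions[instr]
--
--                     # If code is valid, calculate value
--                     if(sum_code==len(data)):
--                             code = list(code)
--                             value = machine(data,code)
--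
--                             # If value if bigger than current max
--                             # Update max value and code
--                             if(value>max_val):
--                                     max_val = value
--                                     max_code = code
--
--     # Return Max Code
--     return max_code
-- ===== SOURCE B (Python) =====
-- def largestProgram(data):
--     # Linear DP over suffixes: best (value, #instructions, code) for each suffix,
--     # tie-break = fewer instructions, then lexicographic with ADD before MUL
--     # (exactly the order A enumerates candidates in).
--     if not data:
--         return None
--     best = (0, 0, [])      # best program for the suffix just processed
--     best2 = None           # best program for the suffix one element shorter than `best`'s
--     prev = None            # the data element in front of `best2`'s suffix
--     for a in reversed(data):
--         cand = (a + best[0], best[1] + 1, ['ADD'] + best[2])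
--         if prev is not None:
--             v2, l2, c2 = best2
--             mv = a * prev + v2
--             if mv > cand[0] or (mv == cand[0] and l2 + 1 < cand[1]):
--                 cand = (mv, l2 + 1, ['MUL'] + c2)
--         prev, best2, best = a, best, cand
--     return best[2]
-- ===== Notes on version B (the rewrite author's own statement) =====
-- stated objective: faster
-- what changed: Replaces brute-force enumeration of all 2^k instruction tuples for every length k (A) with one right-to-left dynamic-programming pass that keeps, per suffix, the best (value, instruction-count, code) triple under A's tie-break order (fewer instructions, then lexicographic with ADD before MUL).
import Mathlib
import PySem

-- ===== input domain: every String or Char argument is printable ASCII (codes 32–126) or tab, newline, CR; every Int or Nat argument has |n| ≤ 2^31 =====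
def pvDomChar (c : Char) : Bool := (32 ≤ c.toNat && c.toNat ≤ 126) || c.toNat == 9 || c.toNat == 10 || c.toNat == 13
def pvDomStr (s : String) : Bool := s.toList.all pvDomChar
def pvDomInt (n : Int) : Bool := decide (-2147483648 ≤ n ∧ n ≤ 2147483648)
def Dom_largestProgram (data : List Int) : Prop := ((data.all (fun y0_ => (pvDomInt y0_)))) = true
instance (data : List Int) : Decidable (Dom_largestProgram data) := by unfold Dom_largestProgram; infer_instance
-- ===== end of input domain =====

-- B replaces A's brute-force enumeration of all instruction tuples (exponential) with one
-- right-to-left DP pass keeping the best (value, length, code) per suffix under A's tie-break.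

-- ===== PORT A =====

-- the dict {'ADD': 1, 'MUL': 2}
def pvInstr : PySem.Dict String Int := (PySem.Dict.empty.insert "ADD" 1).insert "MUL" 2

-- one step of machine's `for instruction in code` loop; state = Option (i, value), none = raised
def pvMachineStep (data : List Int) (st : Option (Int × Int)) (instr : String) : Option (Int × Int) :=
  match st with
  | none => none
  | some (i, value) =>
    if (data.length : Int) ≤ i then none            -- "Ran out of numbers"
    else if instr = "ADD" then
      match PySem.List.pyGet? data i with
      | some x => some (i + 1, value + x)
      | none => none
    else if instr = "MUL" then
      match PySem.List.pyGet? data i, PySem.List.pyGet? data (i + 1) with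
      | some x, some y => some (i + 2, value + x * y)
      | _, _ => none
    else none                                        -- "Illegal Instruction"

-- machine(data, code); `none` = the Python raises
def machine (data : List Int) (code : List String) : Option Int :=
  match code.foldl (pvMachineStep data) (some ((0 : Int), (0 : Int))) with
  | none => none
  | some (i, value) => if i < (data.length : Int) then none else some value

-- list(itertools.product(('ADD','MUL'), repeat=k)), in product's exact (lexicographic) order
def prodRep : Nat → List (List String)
  | 0 => [[]]
  | k + 1 => ["ADD", "MUL"].flatMap (fun x => (prodRep k).map (fun c => x :: c))

-- body of A's `for code in codes` loop; state = (max_val, max_code), max_val = none is -inf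
def pvCodeStep (data : List Int) (st : Option Int × Option (List String)) (code : List String) :
    Option Int × Option (List String) :=
  let sum_code : Int := code.foldl (fun s instr => s + pvInstr.getD instr 0) 0
  -- dict lookup instrunctions[instr]; the default 0 is unreachable (product emits only keys)
  if sum_code = PySem.List.len data then
    match machine data code with
    | none => st     -- unreachable: a code with sum_code == len(data) never raises in machine
    | some value =>
      match st.1 with
      | none => (some value, some code)
      | some m => if value > m then (some value, some code) else st
  else st

def largestProgram (data : List Int) : Option (List String) :=
  ((PySem.List.pyRange 1 ((data.length : Int) + 1) 1).foldl
    (fun st k => (prodRep k.toNat).foldl (pvCodeStep data) st) (none, none)).2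

-- ===== PORT B =====

-- one step of B's `for a in reversed(data)` loop; state = (prev, best, best2)
def pvBStep (st : Option Int × (Int × Int × List String) × Option (Int × Int × List String))
    (a : Int) : Option Int × (Int × Int × List String) × Option (Int × Int × List String) :=
  let (prev, best, best2) := st
  let cand : Int × Int × List String := (a + best.1, best.2.1 + 1, "ADD" :: best.2.2)
  let cand :=
    match prev, best2 with
    | some p, some (v2, l2, c2) =>
      let mv := a * p + v2
      if mv > cand.1 ∨ (mv = cand.1 ∧ l2 + 1 < cand.2.1) then (mv, l2 + 1, "MUL" :: c2)
      else cand
    | _, _ => cand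
  (some a, cand, some best)

def largestProgram_alt (data : List Int) : Option (List String) :=
  if data = [] then none
  else some ((data.reverse.foldl pvBStep (none, (0, 0, []), none)).2.1.2.2)

-- ===== PRECONDITION & SPEC =====
def Spec_largestProgram (data : List Int) (out : Option (List String)) : Prop := out = largestProgram_alt data
instance (data : List Int) (out : Option (List String)) : Decidable (Spec_largestProgram data out) := by unfold Spec_largestProgram; infer_instance

-- ===== CLAIM (what is proved, stated in full; the proofs are below) =====
def Claim_equal_largestProgram : Prop := ∀ (data : List Int), Dom_largestProgram data → Spec_largestProgram data (largestProgram data)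

-- ===== LEMMAS AND PROOFS =====

-- `code` consists only of "ADD"/"MUL"
def isAM (code : List String) : Prop := ∀ s ∈ code, s = "ADD" ∨ s = "MUL"

-- number of data items a code consumes
def costN (code : List String) : Nat := (code.map (fun i => if i = "ADD" then 1 else 2)).sum

-- the value a valid code computes (pure form of `machine`)
def evalV : List String → List Int → Int
  | [], _ => 0
  | instr :: c, d =>
    if instr = "ADD" then
      match d with
      | a :: d' => a + evalV c d'
      | [] => 0
    else
      match d with
      | a :: b :: d' => a * b + evalV c d'
      | _ => 0

-- strict lexicographic order with "ADD" < "MUL"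
def lexLt : List String → List String → Prop
  | _, [] => False
  | [], _ :: _ => True
  | x :: xs, y :: ys => (x = "ADD" ∧ y = "MUL") ∨ (x = y ∧ lexLt xs ys)

-- A's enumeration order: shorter codes first, then lexicographic
def ordC (c c' : List String) : Prop :=
  c.length < c'.length ∨ (c.length = c'.length ∧ lexLt c c')

-- B's DP table entry for a suffix: (value, #instructions, code)
def bestT : List Int → Int × Int × List String
  | [] => (0, 0, [])
  | [a] => (a, 1, ["ADD"])
  | a :: b :: rest =>
    if a * b + (bestT rest).1 > a + (bestT (b :: rest)).1 ∨
        (a * b + (bestT rest).1 = a + (bestT (b :: rest)).1 ∧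
          (bestT rest).2.1 + 1 < (bestT (b :: rest)).2.1 + 1) then
      (a * b + (bestT rest).1, (bestT rest).2.1 + 1, "MUL" :: (bestT rest).2.2)
    else (a + (bestT (b :: rest)).1, (bestT (b :: rest)).2.1 + 1, "ADD" :: (bestT (b :: rest)).2.2)

-- A's filtered candidate list, in A's enumeration order
def pvL (n : Nat) : List (List String) :=
  (List.range n).flatMap (fun j => (prodRep (j + 1)).filter (fun c => costN c = n))

-- the pure max-tracking step A performs on valid codes
def pvFStep (data : List Int) (st : Option Int × Option (List String)) (code : List String) :
    Option Int × Option (List String) :=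
  match st.1 with
  | none => (some (evalV code data), some code)
  | some m => if evalV code data > m then (some (evalV code data), some code) else st

theorem lexLt_asymm : ∀ c c' : List String, lexLt c c' → lexLt c' c → False := by
  intro c
  induction c with
  | nil => intro c' h1 h2; cases c' <;> simp [lexLt] at h1 h2
  | cons x xs ih =>
    intro c' h1 h2
    cases c' with
    | nil => simp [lexLt] at h1
    | cons y ys =>
      simp only [lexLt] at h1 h2
      rcases h1 with ⟨hx, hy⟩ | ⟨hxy, h1⟩ <;> rcases h2 with ⟨hy', hx'⟩ | ⟨hyx, h2⟩
      · subst hx hy; simp at hy'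
      · subst hx hy; simp at hyx
      · subst hxy; simp_all
      · exact ih ys h1 h2

theorem ordC_asymm {c c' : List String} (h1 : ordC c c') (h2 : ordC c' c) : False := by
  rcases h1 with h1 | ⟨hl1, h1⟩ <;> rcases h2 with h2 | ⟨hl2, h2⟩
  · omega
  · omega
  · omega
  · exact lexLt_asymm _ _ h1 h2

theorem mem_prodRep {k : Nat} {c : List String} :
    c ∈ prodRep k ↔ c.length = k ∧ isAM c := by
  induction k generalizing c with
  | zero =>
    simp only [prodRep, List.mem_singleton]
    constructor
    · rintro rfl; exact ⟨rfl, by intro s hs; simp at hs⟩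
    · intro h; exact List.eq_nil_of_length_eq_zero h.1
  | succ k ih =>
    simp only [prodRep, List.mem_flatMap, List.mem_map]
    constructor
    · rintro ⟨x, hx, d, hd, rfl⟩
      rcases ih.mp hd with ⟨hl, ham⟩
      refine ⟨by simp [hl], ?_⟩
      intro s hs
      rcases hs with _ | hs
      · simp at hx; rcases hx with rfl | rfl <;> simp
      · exact ham s (by assumption)
    · rintro ⟨hl, ham⟩
      cases c with
      | nil => simp at hl
      | cons x d =>
        refine ⟨x, ?_, d, ih.mpr ⟨by simpa using hl, fun s hs => ham s (List.mem_cons_of_mem _ hs)⟩, rfl⟩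
        have := ham x (by simp)
        simpa using this

theorem pairwise_prodRep (k : Nat) : (prodRep k).Pairwise lexLt := by
  induction k with
  | zero => simp [prodRep]
  | succ k ih =>
    simp only [prodRep]
    rw [List.pairwise_flatMap]
    constructor
    · intro a _
      rw [List.pairwise_map]
      exact ih.imp (fun h => Or.inr ⟨rfl, h⟩)
    · simp only [List.pairwise_cons, List.mem_singleton]
      constructor
      · rintro y rfl x hx z hz
        simp only [List.mem_map] at hx hz
        rcases hx with ⟨d, _, rfl⟩; rcases hz with ⟨e, _, rfl⟩
        exact Or.inl ⟨rfl, rfl⟩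
      · exact ⟨fun y h => absurd h (by simp), List.Pairwise.nil⟩

theorem length_le_costN (c : List String) : c.length ≤ costN c := by
  induction c with
  | nil => simp [costN]
  | cons x xs ih =>
    simp only [costN, List.map_cons, List.sum_cons, List.length_cons]
    have : (if x = "ADD" then 1 else 2) ≥ 1 := by split <;> omega
    simp only [costN] at ih
    omega

theorem mem_pvL {n : Nat} {c : List String} (hn : 1 ≤ n) :
    c ∈ pvL n ↔ isAM c ∧ costN c = n := by
  simp only [pvL, List.mem_flatMap, List.mem_range, List.mem_filter, decide_eq_true_eq]
  constructor
  · rintro ⟨j, _, hc, hcost⟩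
    exact ⟨(mem_prodRep.mp hc).2, hcost⟩
  · rintro ⟨ham, hcost⟩
    have hlen : c.length ≤ n := hcost ▸ length_le_costN c
    have hpos : 1 ≤ c.length := by
      rcases c with _ | ⟨x, xs⟩
      · simp [costN] at hcost; omega
      · simp
    exact ⟨c.length - 1, by omega, mem_prodRep.mpr ⟨by omega, ham⟩, hcost⟩

theorem pairwise_pvL (n : Nat) : (pvL n).Pairwise ordC := by
  rw [pvL, List.pairwise_flatMap]
  constructor
  · intro j _
    refine List.Pairwise.imp_of_mem ?_ ((pairwise_prodRep (j + 1)).filter _)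
    intro a b ha hb hlex
    have la := (mem_prodRep.mp (List.mem_of_mem_filter ha)).1
    have lb := (mem_prodRep.mp (List.mem_of_mem_filter hb)).1
    exact Or.inr ⟨by omega, hlex⟩
  · refine List.pairwise_lt_range.imp ?_
    intro j1 j2 hj x hx y hy
    have lx := (mem_prodRep.mp (List.mem_of_mem_filter hx)).1
    have ly := (mem_prodRep.mp (List.mem_of_mem_filter hy)).1
    exact Or.inl (by omega)

-- the machine loop, tracked against a prefix/suffix split of data
theorem machine_fold (code : List String) : ∀ (pre suf : List Int) (v : Int),
    isAM code → costN code = suf.length →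
    code.foldl (pvMachineStep (pre ++ suf)) (some ((pre.length : Int), v)) =
      some ((((pre ++ suf).length : Int)), v + evalV code suf) := by
  induction code with
  | nil =>
    intro pre suf v _ hcost
    have : suf = [] := by
      simp [costN] at hcost; exact List.eq_nil_of_length_eq_zero hcost.symm
    subst this
    simp [evalV]
  | cons instr rest ih =>
    intro pre suf v ham hcost
    have hinstr := ham instr (by simp)
    have hrest : isAM rest := fun s hs => ham s (List.mem_cons_of_mem _ hs)
    rcases hinstr with rfl | rfl
    · -- ADD
      have hc : 1 + costN rest = suf.length := by
        simpa [costN] using hcost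
      obtain ⟨a, suf', rfl⟩ : ∃ a suf', suf = a :: suf' := by
        cases suf with
        | nil => simp at hc
        | cons a s => exact ⟨a, s, rfl⟩
      simp only [List.foldl_cons, pvMachineStep]
      rw [if_neg (by simp only [List.length_append, List.length_cons]; push_cast; omega)]
      simp only [if_true]
      simp only [PySem.List.pyGet?_append_length]
      have hre : pre ++ a :: suf' = (pre ++ [a]) ++ suf' := by simp
      have hidx : (pre.length : Int) + 1 = ((pre ++ [a]).length : Int) := by
        simp
      rw [hidx, hre, ih (pre ++ [a]) suf' (v + a) hrest (by simp [costN] at hc ⊢; omega)]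
      simp [evalV]
      try ring
    · -- MUL
      have hc : 2 + costN rest = suf.length := by
        simpa [costN] using hcost
      obtain ⟨a, b, suf', rfl⟩ : ∃ a b suf', suf = a :: b :: suf' := by
        cases suf with
        | nil => simp at hc
        | cons a s =>
          cases s with
          | nil => simp at hc; omega
          | cons b s' => exact ⟨a, b, s', rfl⟩
      simp only [List.foldl_cons, pvMachineStep]
      rw [if_neg (by simp only [List.length_append, List.length_cons]; push_cast; omega), if_neg (by decide)]
      simp only [if_true]
      simp only [PySem.List.pyGet?_append_length]
      have hre : pre ++ a :: b :: suf' = (pre ++ [a]) ++ b :: suf' := by simp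
      have hidx : (pre.length : Int) + 1 = (((pre ++ [a]) : List Int).length : Int) := by
        simp
      rw [hidx, hre]
      simp only [PySem.List.pyGet?_append_length]
      have hre2 : (pre ++ [a]) ++ b :: suf' = (pre ++ [a, b]) ++ suf' := by simp
      have hidx2 : (pre.length : Int) + 2 = (((pre ++ [a, b]) : List Int).length : Int) := by
        simp
      rw [hidx2, hre2, ih (pre ++ [a, b]) suf' (v + a * b) hrest (by simp [costN] at hc ⊢; omega)]
      simp [evalV]
      try ring

-- machine agrees with evalV on valid codes
theorem machine_eq_evalV {data : List Int} {code : List String}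
    (ham : isAM code) (hcost : costN code = data.length) :
    machine data code = some (evalV code data) := by
  have h := machine_fold code [] data 0 ham (by simpa using hcost)
  simp only [List.nil_append, List.length_nil, Int.natCast_zero, zero_add] at h
  simp only [machine, h]
  rw [if_neg (by omega)]

theorem lexLt_cons_same (x : String) {c c' : List String} (h : lexLt c c') :
    lexLt (x :: c) (x :: c') := Or.inr ⟨rfl, h⟩

theorem lexLt_AM (u w : List String) : lexLt ("ADD" :: u) ("MUL" :: w) := Or.inl ⟨rfl, rfl⟩

theorem ordC_cons (x : String) {c c' : List String} (h : ordC c c') : ordC (x :: c) (x :: c') := by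
  rcases h with h | ⟨h1, h2⟩
  · exact Or.inl (by simpa using h)
  · exact Or.inr ⟨by simpa using h1, lexLt_cons_same x h2⟩

-- a valid code for a :: b :: rest starts with ADD (consuming one) or MUL (consuming two)
theorem valid_decomp {c : List String} {k : Nat} (ham : isAM c) (hcost : costN c = k + 2) :
    (∃ d, c = "ADD" :: d ∧ isAM d ∧ costN d = k + 1) ∨
    (∃ d, c = "MUL" :: d ∧ isAM d ∧ costN d = k) := by
  cases c with
  | nil => simp [costN] at hcost
  | cons s d =>
    have hd : isAM d := fun t ht => ham t (List.mem_cons_of_mem _ ht)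
    rcases ham s (by simp) with rfl | rfl
    · exact Or.inl ⟨d, rfl, hd, by simp [costN] at hcost ⊢; omega⟩
    · exact Or.inr ⟨d, rfl, hd, by simp [costN] at hcost ⊢; omega⟩

theorem evalV_ADD (d : List String) (a : Int) (r : List Int) :
    evalV ("ADD" :: d) (a :: r) = a + evalV d r := by simp [evalV]

theorem evalV_MUL (d : List String) (a b : Int) (r : List Int) :
    evalV ("MUL" :: d) (a :: b :: r) = a * b + evalV d r := by simp [evalV]

-- bestT computes the optimal valid code for a suffix, with A's tie-break
def BTP (data : List Int) : Prop :=
  isAM (bestT data).2.2 ∧ costN (bestT data).2.2 = data.length ∧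
    (bestT data).1 = evalV (bestT data).2.2 data ∧
    (bestT data).2.1 = ((bestT data).2.2.length : Int) ∧
    ∀ c, isAM c → costN c = data.length →
      evalV c data < (bestT data).1 ∨
      (evalV c data = (bestT data).1 ∧ ((bestT data).2.2 = c ∨ ordC (bestT data).2.2 c))

-- the two-way step case of the induction (shared by both branches of bestT.induct)
theorem bestT_step (a b : Int) (rest : List Int) (ih1 : BTP (b :: rest)) (ih2 : BTP rest) :
    BTP (a :: b :: rest) := by
  obtain ⟨am1, co1, va1, le1, op1⟩ := ih1
  obtain ⟨am2, co2, va2, le2, op2⟩ := ih2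
  by_cases hco : a * b + (bestT rest).1 > a + (bestT (b :: rest)).1 ∨
      (a * b + (bestT rest).1 = a + (bestT (b :: rest)).1 ∧
        (bestT rest).2.1 + 1 < (bestT (b :: rest)).2.1 + 1)
  · have hbt : bestT (a :: b :: rest) =
        (a * b + (bestT rest).1, (bestT rest).2.1 + 1, "MUL" :: (bestT rest).2.2) := by
      simp only [bestT]; rw [if_pos hco]
    rw [BTP, hbt]
    refine ⟨?_, ?_, ?_, ?_, ?_⟩
    · intro s hs
      rcases hs with _ | hs
      · exact Or.inr rfl
      · exact am2 s (by assumption)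
    · simp [costN] at co2 ⊢; omega
    · rw [evalV_MUL, va2]
    · simp only [List.length_cons]; push_cast; omega
    · intro c ham hcost
      have hle : a * b + (bestT rest).1 ≥ a + (bestT (b :: rest)).1 := by
        rcases hco with h | ⟨h, _⟩ <;> omega
      rcases valid_decomp ham (by simpa using hcost) with ⟨d, rfl, hamd, hcd⟩ | ⟨d, rfl, hamd, hcd⟩
      · -- c = ADD :: d
        rw [evalV_ADD]
        rcases op1 d hamd (by simpa using hcd) with h | ⟨heq, hdc⟩
        · exact Or.inl (by omega)
        · rcases hco with h | ⟨h, hlen⟩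
          · exact Or.inl (by omega)
          · refine Or.inr ⟨by omega, Or.inr ?_⟩
            have hdl : (bestT (b :: rest)).2.2.length ≤ d.length := by
              rcases hdc with rfl | hord
              · omega
              · rcases hord with h' | ⟨h', _⟩ <;> omega
            refine Or.inl ?_
            simp only [List.length_cons]
            rw [le1, le2] at hlen
            have : (bestT rest).2.2.length < (bestT (b :: rest)).2.2.length := by
              exact_mod_cast (by omega :
                ((bestT rest).2.2.length : Int) < (bestT (b :: rest)).2.2.length)
            omega
      · -- c = MUL :: d
        rw [evalV_MUL]
        rcases op2 d hamd hcd with h | ⟨heq, hdc⟩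
        · exact Or.inl (by omega)
        · refine Or.inr ⟨by omega, ?_⟩
          rcases hdc with rfl | hord
          · exact Or.inl rfl
          · exact Or.inr (ordC_cons _ hord)
  · have hbt : bestT (a :: b :: rest) =
        (a + (bestT (b :: rest)).1, (bestT (b :: rest)).2.1 + 1,
          "ADD" :: (bestT (b :: rest)).2.2) := by
      simp only [bestT]; rw [if_neg hco]
    push Not at hco
    rw [BTP, hbt]
    refine ⟨?_, ?_, ?_, ?_, ?_⟩
    · intro s hs
      rcases hs with _ | hs
      · exact Or.inl rfl
      · exact am1 s (by assumption)
    · simp [costN] at co1 ⊢; omega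
    · rw [evalV_ADD, va1]
    · simp only [List.length_cons]; push_cast; omega
    · intro c ham hcost
      rcases valid_decomp ham (by simpa using hcost) with ⟨d, rfl, hamd, hcd⟩ | ⟨d, rfl, hamd, hcd⟩
      · -- c = ADD :: d
        rw [evalV_ADD]
        rcases op1 d hamd (by simpa using hcd) with h | ⟨heq, hdc⟩
        · exact Or.inl (by omega)
        · refine Or.inr ⟨by omega, ?_⟩
          rcases hdc with rfl | hord
          · exact Or.inl rfl
          · exact Or.inr (ordC_cons _ hord)
      · -- c = MUL :: d
        rw [evalV_MUL]
        rcases op2 d hamd hcd with h | ⟨heq, hdc⟩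
        · exact Or.inl (by omega)
        · by_cases hstrict : a * b + (bestT rest).1 < a + (bestT (b :: rest)).1
          · exact Or.inl (by omega)
          · have heq2 : a * b + (bestT rest).1 = a + (bestT (b :: rest)).1 := by omega
            have hlen := hco.2 heq2
            refine Or.inr ⟨by omega, Or.inr ?_⟩
            have hdl : (bestT rest).2.2.length ≤ d.length := by
              rcases hdc with rfl | hord
              · omega
              · rcases hord with h' | ⟨h', _⟩ <;> omega
            have hll : (bestT (b :: rest)).2.2.length ≤ (bestT rest).2.2.length := by
              rw [le1, le2] at hlen
              exact_mod_cast (by omega :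
                ((bestT (b :: rest)).2.2.length : Int) ≤ ((bestT rest).2.2.length : Int))
            rcases Nat.lt_or_ge (bestT (b :: rest)).2.2.length d.length with hlt | hge
            · exact Or.inl (by simp only [List.length_cons]; omega)
            · have : (bestT (b :: rest)).2.2.length = d.length := by omega
              exact Or.inr ⟨by simp only [List.length_cons]; omega, lexLt_AM _ _⟩

theorem bestT_spec (data : List Int) :
    isAM (bestT data).2.2 ∧ costN (bestT data).2.2 = data.length ∧
    (bestT data).1 = evalV (bestT data).2.2 data ∧
    (bestT data).2.1 = ((bestT data).2.2.length : Int) ∧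
    ∀ c, isAM c → costN c = data.length →
      evalV c data < (bestT data).1 ∨
      (evalV c data = (bestT data).1 ∧ ((bestT data).2.2 = c ∨ ordC (bestT data).2.2 c)) := by
  have hBTP : BTP data := by
    induction data using bestT.induct with
    | case1 =>
      refine ⟨?_, rfl, rfl, rfl, ?_⟩
      · intro s hs
        exact absurd hs (by simp [bestT])
      · intro c _ hcost
        simp only [List.length_nil] at hcost
        have hc : c = [] := List.eq_nil_of_length_eq_zero
          (by have := length_le_costN c; omega)
        subst hc
        exact Or.inr ⟨rfl, Or.inl rfl⟩
    | case2 a =>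
      refine ⟨?_, rfl, by simp [evalV, bestT], rfl, ?_⟩
      · intro s hs
        have hs' : s = "ADD" := by simpa [bestT] using hs
        exact Or.inl hs'
      · intro c ham hcost
        simp only [List.length_singleton] at hcost
        have hc : c = ["ADD"] := by
          cases c with
          | nil => simp [costN] at hcost
          | cons s d =>
            have h1 := length_le_costN (s :: d)
            simp only [List.length_cons] at h1
            have hdnil : d = [] := List.eq_nil_of_length_eq_zero (by omega)
            subst hdnil
            rcases ham s (by simp) with rfl | rfl
            · rfl
            · simp [costN] at hcost
        subst hc
        exact Or.inr ⟨by simp [evalV, bestT], Or.inl rfl⟩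
    | case3 a b rest _ ihr ihbr => exact bestT_step a b rest ihbr ihr
    | case4 a b rest _ ihr ihbr => exact bestT_step a b rest ihbr ihr
  exact hBTP

-- B's fold computes (head?, bestT data, bestT of the tail)
theorem bfold (data : List Int) :
    data.reverse.foldl pvBStep (none, (0, 0, []), none) =
      (data.head?, bestT data,
        match data with | [] => none | _ :: t => some (bestT t)) := by
  rw [List.foldl_reverse]
  induction data with
  | nil => rfl
  | cons a rest ih =>
    rw [List.foldr_cons, ih]
    cases rest with
    | nil => simp [pvBStep, bestT]
    | cons b t =>
      show pvBStep (some b, bestT (b :: t), some (bestT t)) a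
          = (some a, bestT (a :: b :: t), some (bestT (b :: t)))
      simp only [pvBStep, bestT]

-- the first-max fold: once the champion is reached it never changes
theorem foldl_fstep_keep (data : List Int) (l : List (List String)) (v : Int)
    (mc : Option (List String)) (h : ∀ c ∈ l, evalV c data ≤ v) :
    l.foldl (pvFStep data) (some v, mc) = (some v, mc) := by
  induction l with
  | nil => rfl
  | cons c rest ih =>
    have hc := h c (by simp)
    simp only [List.foldl_cons, pvFStep]
    rw [if_neg (by omega)]
    exact ih fun d hd => h d (List.mem_cons_of_mem _ hd)

theorem foldl_fstep_reach (data : List Int) (b : List String) :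
    ∀ (l : List (List String)), l.Pairwise ordC → b ∈ l →
    (∀ c ∈ l, evalV c data < evalV b data ∨
      (evalV c data = evalV b data ∧ (b = c ∨ ordC b c))) →
    ∀ (mv : Option Int) (mc : Option (List String)),
      (∀ m, mv = some m → m < evalV b data) →
      l.foldl (pvFStep data) (mv, mc) = (some (evalV b data), some b) := by
  intro l
  induction l with
  | nil => intro _ hb; simp at hb
  | cons c rest ih =>
    intro hpw hb hopt mv mc hmv
    by_cases hcb : c = b
    · subst hcb
      have hstep : pvFStep data (mv, mc) c = (some (evalV c data), some c) := by
        cases mv with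
        | none => rfl
        | some m => simp only [pvFStep]; rw [if_pos (by have := hmv m rfl; omega)]
      simp only [List.foldl_cons, hstep]
      exact foldl_fstep_keep data rest _ _ fun d hd => by
        rcases hopt d (List.mem_cons_of_mem _ hd) with h | ⟨h, _⟩ <;> omega
    · have hbr : b ∈ rest := by cases hb with | head => exact absurd rfl hcb | tail _ h => exact h
      have hclt : evalV c data < evalV b data := by
        rcases hopt c (by simp) with h | ⟨h, hh⟩
        · exact h
        · rcases hh with rfl | hh
          · exact absurd rfl hcb
          · exact absurd hh fun hh => ordC_asymm hh ((List.pairwise_cons.mp hpw).1 b hbr)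
      simp only [List.foldl_cons]
      have hstate : ∀ m, (pvFStep data (mv, mc) c).1 = some m → m < evalV b data := by
        intro m hm
        cases mv with
        | none => simp only [pvFStep] at hm; cases hm; omega
        | some m' =>
          simp only [pvFStep] at hm
          split at hm
          · cases hm; omega
          · cases hm; exact hmv m rfl
      have := ih (List.pairwise_cons.mp hpw).2 hbr
        (fun d hd => hopt d (List.mem_cons_of_mem _ hd))
        (pvFStep data (mv, mc) c).1 (pvFStep data (mv, mc) c).2 hstate
      simpa using this
    

-- the dict-lookup cost sum equals costN on ADD/MUL codes
theorem intCost_eq {c : List String} (ham : isAM c) :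
    ∀ a : Int, c.foldl (fun s instr => s + pvInstr.getD instr 0) a = a + (costN c : Int) := by
  induction c with
  | nil => intro a; simp [costN]
  | cons x xs ih =>
    intro a
    have hx := ham x (by simp)
    have hxs : isAM xs := fun s hs => ham s (List.mem_cons_of_mem _ hs)
    have hA : pvInstr.getD "ADD" 0 = 1 := by decide
    have hM : pvInstr.getD "MUL" 0 = 2 := by decide
    rcases hx with rfl | rfl <;>
      simp only [List.foldl_cons, ih hxs, costN, List.map_cons, List.sum_cons, hA, hM] <;>
      · push_cast
        ring

-- on ADD/MUL codes, A's loop body is the pure first-max step guarded by the cost test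
theorem codeStep_eq {data : List Int} {c : List String} (ham : isAM c)
    (st : Option Int × Option (List String)) :
    pvCodeStep data st c = if costN c = data.length then pvFStep data st c else st := by
  unfold pvCodeStep
  rw [intCost_eq ham 0]
  simp only [zero_add, PySem.List.len_eq, Int.natCast_inj]
  split
  · next h => rw [machine_eq_evalV ham h]; rfl
  · rfl

-- A's fold is the pure first-max fold over pvL
theorem largestProgram_eq_fold (data : List Int) :
    largestProgram data = ((pvL data.length).foldl (pvFStep data) (none, none)).2 := by
  unfold largestProgram
  rw [PySem.List.pyRange_one]
  have h1 : (((data.length : Int) + 1) - 1).toNat = data.length := by omega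
  rw [h1, List.foldl_map]
  apply congrArg Prod.snd
  rw [pvL, List.foldl_flatMap]
  refine List.foldl_ext _ _ _ ?_
  intro st j _
  have hj : (1 + (j : Int)).toNat = j + 1 := by omega
  rw [hj, List.foldl_filter]
  refine PySem.List.foldl_congr_mem _ _ _ _ ?_
  intro acc c hc
  rw [codeStep_eq (mem_prodRep.mp hc).2]
  simp


theorem largestProgram_spec' (data : List Int) :
    largestProgram data = largestProgram_alt data := by
  cases data with
  | nil =>
    unfold largestProgram largestProgram_alt
    rw [PySem.List.pyRange_one_eq_nil (by simp)]
    rfl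
  | cons x rest =>
    obtain ⟨ham, hcost, hval, -, hopt⟩ := bestT_spec (x :: rest)
    rw [largestProgram_eq_fold]
    have hreach := foldl_fstep_reach (x :: rest) (bestT (x :: rest)).2.2 (pvL (x :: rest).length)
      (pairwise_pvL _)
      ((mem_pvL (by simp)).mpr ⟨ham, hcost⟩)
      (fun c hc => by
        obtain ⟨hamc, hcostc⟩ := (mem_pvL (by simp)).mp hc
        rw [← hval]
        exact hopt c hamc hcostc)
      none none (fun m hm => by cases hm)
    rw [hreach]
    unfold largestProgram_alt
    rw [if_neg (by simp), bfold]

-- ===== VERDICT (by name: the statement is the Claim_ definition above) =====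
theorem largestProgram_spec : Claim_equal_largestProgram := by
  intro data _
  unfold Spec_largestProgram
  exact largestProgram_spec' data
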